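-- pv_equiv track=rewrite | github.com/nathan1536/FlowCriticGuidance | ManiFlow/maniflow/env_runner/metaworld_multitask_runner_mp_2d.py | allocate_tasks_to_gpus
-- ===== SOURCE A (Python) =====
-- def allocate_tasks_to_gpus(task_names, devices):
--     """
--     Distribute tasks across GPUs to ensure balanced load distribution.
--     (Same helper as the 3D MP runner.)
--     """
--     num_devices = len(devices)
--     num_tasks = len(task_names)
--
--     base_tasks_per_gpu = num_tasks // num_devices
--     remainder = num_tasks % num_devices
--
--     tasks_per_gpu = [base_tasks_per_gpu + (1 if i < remainder else 0) for i in range(num_devices)]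
--     rank_to_device = {rank: device for rank, device in enumerate(devices)}
--
--     allocation = {}
--     current_task_idx = 0
--     for gpu_idx, num_tasks_for_gpu in enumerate(tasks_per_gpu):
--         for _ in range(num_tasks_for_gpu):
--             if current_task_idx < len(task_names):
--                 allocation[task_names[current_task_idx]] = gpu_idx
--                 current_task_idx += 1
--
--     return allocation, rank_to_device
-- ===== SOURCE B (Python) =====
-- def allocate_tasks_to_gpus(task_names, devices):
--     num_devices = len(devices)
--     num_tasks = len(task_names)
--     base = num_tasks // num_devices
--     remainder = num_tasks % num_devices
--     boundary = remainder * (base + 1)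
--     allocation = {}
--     for t, name in enumerate(task_names):
--         if t < boundary:
--             allocation[name] = t // (base + 1)
--         else:
--             allocation[name] = remainder + (t - boundary) // base
--     rank_to_device = {rank: device for rank, device in enumerate(devices)}
--     return allocation, rank_to_device
-- ===== Notes on version B (the rewrite author's own statement) =====
-- stated objective: simpler
-- what changed: B drops A's tasks_per_gpu count list and nested fill loop, assigning each task's GPU in a single pass with a closed-form index formula (t // (base+1) below the remainder boundary, remainder + (t-boundary) // base above it).
import Mathlib
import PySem

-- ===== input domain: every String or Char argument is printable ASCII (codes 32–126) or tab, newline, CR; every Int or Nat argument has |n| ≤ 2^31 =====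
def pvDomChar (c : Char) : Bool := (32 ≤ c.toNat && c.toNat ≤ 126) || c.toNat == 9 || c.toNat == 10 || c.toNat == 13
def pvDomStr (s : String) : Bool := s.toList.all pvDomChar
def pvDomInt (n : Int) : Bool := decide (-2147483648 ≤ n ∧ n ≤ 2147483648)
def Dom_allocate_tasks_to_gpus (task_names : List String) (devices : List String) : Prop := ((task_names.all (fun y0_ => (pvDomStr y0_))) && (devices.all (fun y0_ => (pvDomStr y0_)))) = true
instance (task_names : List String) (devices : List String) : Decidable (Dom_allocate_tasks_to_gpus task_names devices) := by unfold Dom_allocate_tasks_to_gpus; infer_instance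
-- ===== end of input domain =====

-- B replaces A's tasks_per_gpu count list and nested fill loop by a single pass that
-- computes each task's GPU in closed form (objective: simpler).


-- ===== PORT A =====
-- literal port of A; inside the guarded branch the index is in range, so pyGetD is exact
def allocate_tasks_to_gpus (task_names : List String) (devices : List String) : (List (String × Int)) × (List (Int × String)) :=
  let num_devices : Int := PySem.List.len devices
  let num_tasks : Int := PySem.List.len task_names
  let base_tasks_per_gpu : Int := PySem.Int.floordiv num_tasks num_devices
  let remainder : Int := PySem.Int.mod num_tasks num_devices
  let tasks_per_gpu : List Int :=
    (PySem.List.pyRange 0 num_devices 1).map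
      (fun i => base_tasks_per_gpu + (if i < remainder then (1:Int) else 0))
  let rank_to_device : PySem.Dict Int String :=
    (PySem.List.enumerate devices 0).foldl (fun d p => d.insert p.1 p.2) PySem.Dict.empty
  let st :=
    (PySem.List.enumerate tasks_per_gpu 0).foldl
      (fun (st : PySem.Dict String Int × Int) p =>
        (PySem.List.pyRange 0 p.2 1).foldl
          (fun (st : PySem.Dict String Int × Int) _ =>
            if st.2 < PySem.List.len task_names then
              (st.1.insert (PySem.List.pyGetD task_names st.2 "") p.1, st.2 + 1)
            else st) st)
      (PySem.Dict.empty, 0)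
  (st.1.items, rank_to_device.items)

-- ===== PORT B =====
def allocate_tasks_to_gpus_alt (task_names : List String) (devices : List String) : (List (String × Int)) × (List (Int × String)) :=
  let num_devices : Int := PySem.List.len devices
  let num_tasks : Int := PySem.List.len task_names
  let base : Int := PySem.Int.floordiv num_tasks num_devices
  let remainder : Int := PySem.Int.mod num_tasks num_devices
  let boundary : Int := remainder * (base + 1)
  let allocation : PySem.Dict String Int :=
    (PySem.List.enumerate task_names 0).foldl
      (fun (d : PySem.Dict String Int) p =>
        if p.1 < boundary then d.insert p.2 (PySem.Int.floordiv p.1 (base + 1))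
        else d.insert p.2 (remainder + PySem.Int.floordiv (p.1 - boundary) base))
      PySem.Dict.empty
  let rank_to_device : PySem.Dict Int String :=
    (PySem.List.enumerate devices 0).foldl (fun d p => d.insert p.1 p.2) PySem.Dict.empty
  (allocation.items, rank_to_device.items)

-- ===== PRECONDITION & SPEC =====
-- Pre_ excludes exactly devices = [], where Python A raises ZeroDivisionError (B raises there too).
def Pre_allocate_tasks_to_gpus (task_names : List String) (devices : List String) : Prop := devices ≠ []
instance (task_names : List String) (devices : List String) : Decidable (Pre_allocate_tasks_to_gpus task_names devices) := by unfold Pre_allocate_tasks_to_gpus; infer_instance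
def pvWitness_allocate_tasks_to_gpus : List String × List String := (["t0", "t1", "t2"], ["cuda:0", "cuda:1"])
def Spec_allocate_tasks_to_gpus (task_names : List String) (devices : List String) (out : (List (String × Int)) × (List (Int × String))) : Prop := out = allocate_tasks_to_gpus_alt task_names devices
instance (task_names : List String) (devices : List String) (out : (List (String × Int)) × (List (Int × String))) : Decidable (Spec_allocate_tasks_to_gpus task_names devices out) := by unfold Spec_allocate_tasks_to_gpus; infer_instance

-- ===== CLAIM (what is proved, stated in full; the proofs are below) =====
def Claim_equal_allocate_tasks_to_gpus : Prop := ∀ (task_names : List String) (devices : List String), Dom_allocate_tasks_to_gpus task_names devices → Pre_allocate_tasks_to_gpus task_names devices → Spec_allocate_tasks_to_gpus task_names devices (allocate_tasks_to_gpus task_names devices)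

-- ===== LEMMAS AND PROOFS =====

-- B's closed-form GPU of task index t, for base b and remainder r
def pvGpu (b r : Nat) (t : Int) : Int :=
  if t < (r:Int) * ((b:Int) + 1) then PySem.Int.floordiv t ((b:Int) + 1)
  else (r:Int) + PySem.Int.floordiv (t - (r:Int) * ((b:Int) + 1)) (b:Int)

-- first task index of GPU i, and its task count, in A's scheme
def pvS (b r i : Nat) : Nat := i * b + min i r
def pvC (b r i : Nat) : Nat := b + (if i < r then 1 else 0)

theorem pvS_add_c (b r i : Nat) : pvS b r i + pvC b r i = pvS b r (i+1) := by
  unfold pvS pvC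
  by_cases h : i < r
  · rw [if_pos h, Nat.min_eq_left (Nat.le_of_lt h), Nat.min_eq_left h, Nat.succ_mul]
    omega
  · rw [if_neg h, Nat.min_eq_right (Nat.le_of_not_lt h), Nat.min_eq_right (by omega), Nat.succ_mul]
    omega

theorem pvS_le (b r dv i : Nat) (hi : i ≤ dv) : pvS b r i ≤ dv * b + r :=
  Nat.add_le_add (Nat.mul_le_mul_right _ hi) (Nat.min_le_right i r)

theorem pvGpuEq (b r : Nat) (i t : Nat)
    (h1 : pvS b r i ≤ t) (h2 : t < pvS b r i + pvC b r i) : pvGpu b r (t:Int) = (i:Int) := by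
  simp only [pvS, pvC] at h1 h2
  unfold pvGpu
  by_cases hir : i < r
  · rw [Nat.min_eq_left (Nat.le_of_lt hir)] at h1 h2
    rw [if_pos hir] at h2
    have hlo : i * (b+1) ≤ t := by rw [Nat.mul_add]; omega
    have hhi : t < (i+1) * (b+1) := by rw [Nat.add_mul, Nat.mul_add]; omega
    have hb : t < r * (b+1) := lt_of_lt_of_le hhi (Nat.mul_le_mul_right _ hir)
    have hc : (t:Int) < (r:Int) * ((b:Int)+1) := by exact_mod_cast hb
    rw [if_pos hc]
    have hcast : ((b:Int)+1) = ((b+1 : Nat) : Int) := by push_cast; ring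
    rw [hcast, PySem.Int.floordiv_natCast, Nat.div_eq_of_lt_le hlo hhi]
  · have hri : r ≤ i := Nat.le_of_not_lt hir
    rw [Nat.min_eq_right hri] at h1 h2
    rw [if_neg hir] at h2
    rcases Nat.eq_zero_or_pos b with hb0 | hbpos
    · subst hb0; simp at h1 h2; omega
    · obtain ⟨u, rfl⟩ : ∃ u, i = r + u := ⟨i - r, by omega⟩
      rw [Nat.add_mul] at h1 h2
      have hge : r * (b+1) ≤ t := by have : r * (b+1) = r*b + r := by ring
                                     omega
      have hc : (r:Int) * ((b:Int)+1) ≤ (t:Int) := by exact_mod_cast hge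
      rw [if_neg (not_lt.mpr hc)]
      have hsub : (t:Int) - (r:Int)*((b:Int)+1) = ((t - r*(b+1) : Nat) : Int) := by
        rw [Nat.cast_sub hge]; push_cast; ring
      rw [hsub, PySem.Int.floordiv_natCast]
      have hdiv : (t - r*(b+1)) / b = u := by
        apply Nat.div_eq_of_lt_le
        · have : r * (b+1) = r*b + r := by ring
          omega
        · have h3 : (u+1) * b = u*b + b := by ring
          have h4 : r * (b+1) = r*b + r := by ring
          omega
      rw [hdiv]
      push_cast; ring

theorem pvFoldlIgnore {α β : Type} (l : List α) (f : β → β) (st : β) :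
    l.foldl (fun s _ => f s) st = f^[l.length] st := by
  induction l generalizing st with
  | nil => rfl
  | cons x l ih => simp [List.foldl_cons, ih, Function.iterate_succ_apply]

theorem pvInner (xs : List String) (g : Int) : ∀ (cnt m : Nat) (acc : PySem.Dict String Int), m + cnt ≤ xs.length →
    (fun (st : PySem.Dict String Int × Int) =>
      if st.2 < (xs.length : Int) then (st.1.insert (PySem.List.pyGetD xs st.2 "") g, st.2 + 1) else st)^[cnt] (acc, (m:Int))
    = ((List.range' m cnt).foldl (fun d t => d.insert (PySem.List.pyGetD xs (t:Int) "") g) acc, ((m + cnt : Nat) : Int)) := by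
  intro cnt
  induction cnt with
  | zero => intro m acc h; simp
  | succ k ih =>
    intro m acc h
    rw [Function.iterate_succ_apply]
    have hm : (m:Int) < (xs.length:Int) := by exact_mod_cast (by omega : m < xs.length)
    simp only [if_pos hm]
    have h1 : ((m:Int) + 1) = ((m + 1 : Nat) : Int) := by push_cast; ring
    rw [h1, ih (m+1) _ (by omega), List.range'_succ, List.foldl_cons]
    congr 2
    omega

theorem pvEnumMap {α β : Type} (f : α → β) : ∀ (l : List α) (s : Int),
    PySem.List.enumerate (l.map f) s = (PySem.List.enumerate l s).map (fun p => (p.1, f p.2)) := by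
  intro l
  induction l with
  | nil => intro s; simp [PySem.List.enumerate_nil]
  | cons x l ih => intro s; simp [PySem.List.enumerate_cons, ih]

theorem pvEnumRange : ∀ (len s : Nat),
    PySem.List.enumerate (List.range' s len) (s:Int) = (List.range' s len).map (fun (k : Nat) => ((k:Int), (k:Nat))) := by
  intro len
  induction len with
  | zero => intro s; simp [PySem.List.enumerate_nil]
  | succ k ih =>
    intro s
    rw [List.range'_succ, PySem.List.enumerate_cons, List.map_cons]
    have : ((s:Int) + 1) = ((s + 1 : Nat) : Int) := by push_cast; ring
    rw [this, ih (s+1)]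

theorem pvOuter (xs : List String) (b r dv : Nat) (hn : xs.length = dv * b + r) (hr : r < dv) :
    ∀ (j i : Nat) (acc : PySem.Dict String Int), i + j = dv →
    (List.range' i j).foldl
      (fun (st : PySem.Dict String Int × Int) (k : Nat) =>
        (PySem.List.pyRange 0 ((b:Int) + (if (k:Int) < (r:Int) then (1:Int) else 0)) 1).foldl
          (fun (st : PySem.Dict String Int × Int) _ =>
            if st.2 < (xs.length : Int) then (st.1.insert (PySem.List.pyGetD xs st.2 "") (k:Int), st.2 + 1) else st) st)
      (acc, ((pvS b r i : Nat) : Int))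
    = ((List.range' (pvS b r i) (xs.length - pvS b r i)).foldl
        (fun d t => d.insert (PySem.List.pyGetD xs (t:Int) "") (pvGpu b r (t:Int))) acc, (xs.length : Int)) := by
  intro j
  induction j with
  | zero =>
    intro i acc h
    have hi : i = dv := by omega
    have hS : pvS b r dv = xs.length := by
      rw [hn]; unfold pvS; rw [Nat.min_eq_right (Nat.le_of_lt hr)]
    rw [hi, hS]
    simp
  | succ j ih =>
    intro i acc h
    have hi : i < dv := by omega
    rw [List.range'_succ, List.foldl_cons]
    have hcnt : ((b:Int) + (if ((i:Nat):Int) < (r:Int) then (1:Int) else 0)) = ((pvC b r i : Nat) : Int) := by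
      unfold pvC
      by_cases hir : i < r
      · rw [if_pos hir, if_pos (by exact_mod_cast hir)]; push_cast; ring
      · rw [if_neg hir, if_neg (by exact_mod_cast hir)]; push_cast; ring
    rw [hcnt]
    rw [pvFoldlIgnore (PySem.List.pyRange 0 ((pvC b r i : Nat) : Int) 1)
        (fun (st : PySem.Dict String Int × Int) =>
          if st.2 < (xs.length : Int) then (st.1.insert (PySem.List.pyGetD xs st.2 "") ((i:Nat):Int), st.2 + 1) else st)]
    rw [PySem.List.length_pyRange_one]
    rw [show ((((pvC b r i : Nat) : Int) - 0).toNat) = pvC b r i by simp]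
    have hle1 : pvS b r (i+1) ≤ xs.length := by rw [hn]; exact pvS_le b r dv (i+1) (by omega)
    have hle : pvS b r i + pvC b r i ≤ xs.length := by rw [pvS_add_c]; exact hle1
    rw [pvInner xs ((i:Nat):Int) (pvC b r i) (pvS b r i) acc hle]
    rw [show ((pvS b r i + pvC b r i : Nat):Int) = ((pvS b r (i+1) : Nat):Int) by rw [pvS_add_c]]
    rw [ih (i+1) _ (by omega)]
    have hsplit : xs.length - pvS b r i = pvC b r i + (xs.length - pvS b r (i+1)) := by
      have h5 := pvS_add_c b r i
      omega
    rw [hsplit, ← List.range'_append]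
    rw [List.foldl_append]
    have hS1 : pvS b r i + 1 * pvC b r i = pvS b r (i+1) := by
      rw [one_mul, pvS_add_c]
    rw [hS1]
    congr 1
    rw [PySem.List.foldl_congr_mem _ _
        (fun d t => d.insert (PySem.List.pyGetD xs ((t:Nat):Int) "") (pvGpu b r ((t:Nat):Int))) acc ?_]
    intro d t ht
    rw [List.mem_range'_1] at ht
    simp only
    rw [pvGpuEq b r i t ht.1 ht.2]

theorem pvBfold (xs : List String) (g : Int → Int) : ∀ (k s : Nat) (acc : PySem.Dict String Int), s + k = xs.length →
    (PySem.List.enumerate (xs.drop s) (s:Int)).foldl (fun d p => d.insert p.2 (g p.1)) acc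
    = (List.range' s k).foldl (fun d t => d.insert (PySem.List.pyGetD xs (t:Int) "") (g (t:Int))) acc := by
  intro k
  induction k with
  | zero =>
    intro s acc h
    rw [List.drop_of_length_le (by omega)]
    simp [PySem.List.enumerate_nil]
  | succ k ih =>
    intro s acc h
    have hs : s < xs.length := by omega
    have hget : PySem.List.pyGetD xs ((s:Nat):Int) "" = xs[s] := by
      rw [PySem.List.pyGetD_eq_getElem xs "" (by positivity) (by exact_mod_cast hs)]
      simp
    rw [List.drop_eq_getElem_cons hs, PySem.List.enumerate_cons, List.foldl_cons,
        List.range'_succ, List.foldl_cons, hget]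
    have h1 : ((s:Int) + 1) = ((s + 1 : Nat) : Int) := by push_cast; ring
    rw [h1, ih (s+1) _ (by omega)]

-- ===== VERDICT (by name: the statement is the Claim_ definition above) =====
theorem allocate_tasks_to_gpus_spec : Claim_equal_allocate_tasks_to_gpus := by
  unfold Claim_equal_allocate_tasks_to_gpus
  intro task_names devices _ hpre
  unfold Pre_allocate_tasks_to_gpus at hpre
  unfold Spec_allocate_tasks_to_gpus
  have hdvpos : 0 < devices.length := List.length_pos_of_ne_nil hpre
  unfold allocate_tasks_to_gpus allocate_tasks_to_gpus_alt
  simp only [PySem.List.len_eq, PySem.Int.floordiv_natCast, PySem.Int.mod_natCast]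
  set n := task_names.length with hn'
  set dv := devices.length with hdv'
  set b := n / dv with hb'
  set r := n % dv with hr'
  have hn : n = dv * b + r := (Nat.div_add_mod n dv).symm
  have hr : r < dv := Nat.mod_lt _ hdvpos
  congr 1
  -- allocation dicts agree
  congr 1
  -- A side
  rw [PySem.List.pyRange_one]
  simp only [sub_zero, Int.toNat_natCast, zero_add]
  have hER := pvEnumRange dv 0
  simp only [Nat.cast_zero] at hER
  rw [List.map_map, pvEnumMap, List.range_eq_range', hER, List.foldl_map, List.foldl_map]
  simp only [Function.comp]
  have hA := pvOuter task_names b r dv hn hr dv 0 PySem.Dict.empty (by omega)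
  simp only [show pvS b r 0 = 0 from by simp [pvS], Nat.cast_zero, Nat.sub_zero] at hA
  rw [hA]
  -- B side
  have hstep : (fun (d : PySem.Dict String Int) (p : Int × String) =>
      if p.1 < (r:Int) * ((b:Int) + 1) then d.insert p.2 (PySem.Int.floordiv p.1 ((b:Int) + 1))
      else d.insert p.2 ((r:Int) + PySem.Int.floordiv (p.1 - (r:Int) * ((b:Int) + 1)) (b:Int)))
      = (fun (d : PySem.Dict String Int) (p : Int × String) => d.insert p.2 (pvGpu b r p.1)) := by
    funext d p
    unfold pvGpu
    split <;> rfl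
  rw [hstep]
  have hB := pvBfold task_names (pvGpu b r) n 0 PySem.Dict.empty (by omega)
  simp only [Nat.cast_zero, List.drop_zero] at hB
  rw [hB]
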